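-- pv_equiv track=rewrite | github.com/tzookb/programming-challenges | exercises/leetcode/validate-ip-address/sol.py | validIPv6Part
-- ===== SOURCE A (Python) =====
-- def validIPv6Part(part: str) -> bool:
--     if len(part) > 4 or len(part) == 0:
--         return False
--     part= part.upper()
--     for c in part:
--         v = ord(c)
--         if 57 >= v >= 48 or 70 >= v >= 65:
--             continue
--         else:
--             return False
--     return True
-- ===== SOURCE B (Python) =====
-- import re
--
-- _HEX_PART = re.compile(r'[0-9a-fA-F]{1,4}')
--
-- def validIPv6Part(part: str) -> bool:
--     return _HEX_PART.fullmatch(part) is not None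
-- ===== Notes on version B (the rewrite author's own statement) =====
-- stated objective: idiomatic
-- what changed: Replaces the explicit .upper() normalization plus character-by-character ord-range loop with early returns by a single precompiled regular expression fullmatch whose quantifier {1,4} enforces the length bound and whose character class covers both hex cases.
import Mathlib
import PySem

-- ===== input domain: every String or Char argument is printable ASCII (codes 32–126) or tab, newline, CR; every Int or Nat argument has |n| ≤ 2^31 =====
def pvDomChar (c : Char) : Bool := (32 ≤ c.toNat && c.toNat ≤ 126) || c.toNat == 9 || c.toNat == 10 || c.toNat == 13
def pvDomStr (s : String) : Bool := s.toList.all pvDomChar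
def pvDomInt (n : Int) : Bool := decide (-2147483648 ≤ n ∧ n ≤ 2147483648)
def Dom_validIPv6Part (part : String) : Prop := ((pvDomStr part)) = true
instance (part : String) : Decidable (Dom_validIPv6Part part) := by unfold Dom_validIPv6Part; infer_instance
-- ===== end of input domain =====

-- B replaces A's .upper() normalization and per-character ord-range loop by a single
-- regex fullmatch r'[0-9a-fA-F]{1,4}' (idiomatic; same O(n) cost).


-- ===== PORT A =====
-- the for-loop with continue / early 'return False'
def validIPv6PartLoop : List Char → Bool
  | [] => true
  | c :: rest =>
    let v := c.toNat
    if (57 ≥ v ∧ v ≥ 48) ∨ (70 ≥ v ∧ v ≥ 65) then validIPv6PartLoop rest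
    else false

def validIPv6Part (part : String) : Bool :=
  if PySem.Str.len part > 4 ∨ PySem.Str.len part = 0 then false
  else
    let part := PySem.Str.upper part
    validIPv6PartLoop part.toList

-- ===== PORT B =====
-- regex character class [0-9a-fA-F]
def pvHexClass (c : Char) : Bool :=
  (48 ≤ c.toNat && c.toNat ≤ 57) || (97 ≤ c.toNat && c.toNat ≤ 102) || (65 ≤ c.toNat && c.toNat ≤ 70)

-- fullmatch of r'[0-9a-fA-F]{1,4}': between 1 and 4 characters, each in the class
def validIPv6Part_alt (part : String) : Bool :=
  decide (1 ≤ part.toList.length ∧ part.toList.length ≤ 4) && part.toList.all pvHexClass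

-- ===== PRECONDITION & SPEC =====
def Spec_validIPv6Part (part : String) (out : Bool) : Prop := out = validIPv6Part_alt part
instance (part : String) (out : Bool) : Decidable (Spec_validIPv6Part part out) := by unfold Spec_validIPv6Part; infer_instance

-- ===== CLAIM (what is proved, stated in full; the proofs are below) =====
def Claim_equal_validIPv6Part : Prop := ∀ (part : String), Dom_validIPv6Part part → Spec_validIPv6Part part (validIPv6Part part)

-- ===== LEMMAS AND PROOFS =====

theorem pvChar (c : Char) :
    ((57 ≥ (PySem.Chars.upperChar c).toNat ∧ (PySem.Chars.upperChar c).toNat ≥ 48) ∨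
     (70 ≥ (PySem.Chars.upperChar c).toNat ∧ (PySem.Chars.upperChar c).toNat ≥ 65)) ↔
    pvHexClass c = true := by
  unfold PySem.Chars.upperChar
  by_cases hl : PySem.Chars.islower c = true
  · have hb : 97 ≤ c.toNat ∧ c.toNat ≤ 122 := by
      simp [PySem.Chars.islower, Char.le_def] at hl; exact hl
    rw [if_pos hl, Char.toNat_ofNat, if_pos (by unfold Nat.isValidChar; omega)]
    simp only [pvHexClass, Bool.or_eq_true, Bool.and_eq_true, decide_eq_true_eq]
    omega
  · have hb : c.toNat < 97 ∨ 122 < c.toNat := by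
      by_contra hc
      rw [not_or, not_lt, not_lt] at hc
      exact hl (by simp [PySem.Chars.islower, Char.le_def]; exact hc)
    rw [if_neg hl]
    simp only [pvHexClass, Bool.or_eq_true, Bool.and_eq_true, decide_eq_true_eq]
    omega

theorem pvLoop_eq_all (l : List Char) :
    validIPv6PartLoop (PySem.Chars.upper l) = l.all pvHexClass := by
  induction l with
  | nil => simp [PySem.Chars.upper, validIPv6PartLoop]
  | cons c rest ih =>
    simp only [PySem.Chars.upper, List.map] at ih ⊢
    rw [List.all_cons, validIPv6PartLoop]
    by_cases h : pvHexClass c = true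
    · rw [if_pos ((pvChar c).mpr h), ih, h, Bool.true_and]
    · rw [if_neg (fun hp => h ((pvChar c).mp hp))]
      simp [Bool.eq_false_iff.mpr h]

-- ===== VERDICT (by name: the statement is the Claim_ definition above) =====
theorem validIPv6Part_spec : Claim_equal_validIPv6Part := by
  intro part _
  unfold Spec_validIPv6Part validIPv6Part validIPv6Part_alt
  have hlen : PySem.Str.len part = (part.toList.length : Int) := by
    simp [PySem.Str.len]
  split_ifs with h
  · rw [hlen] at h
    have hd : decide (1 ≤ part.toList.length ∧ part.toList.length ≤ 4) = false := by
      simp only [decide_eq_false_iff_not, not_and, not_le]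
      omega
    rw [hd, Bool.false_and]
  · rw [hlen] at h
    push Not at h
    have hd : decide (1 ≤ part.toList.length ∧ part.toList.length ≤ 4) = true := by
      simp only [decide_eq_true_eq]
      omega
    rw [hd, Bool.true_and]
    show validIPv6PartLoop (PySem.Str.upper part).toList = _
    rw [PySem.Str.toList_upper, pvLoop_eq_all]
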